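-- pv_equiv track=rewrite | github.com/quytttb/FomularLatex | 2025/src/simple_quadratic_format.py | simple_quadratic_root_format
-- ===== SOURCE A (Python) =====
-- def simple_quadratic_root_format(discriminant, b_coeff, a_coeff, is_positive_sqrt=True):
--     """
--     Format nghiệm phương trình bậc hai dạng (-b ± √Δ)/(2a)
--     Đơn giản hóa tự động thành dạng đẹp nhất
--     """
--
--     # Bước 1: Phân tích √discriminant = k√n với n là số không có thừa số chính phương
--     def simplify_sqrt(num):
--         """Đơn giản √num thành k√n"""
--         if num == 0:
--             return 0, 1
--
--         k = 1
--         n = num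
--
--         # Tìm tất cả thừa số chính phương
--         i = 2
--         while i * i <= n:
--             while n % (i * i) == 0:
--                 k *= i
--                 n //= (i * i)
--             i += 1
--
--         return k, n
--
--     sqrt_coeff, sqrt_radical = simplify_sqrt(discriminant)
--
--     # Bước 2: Tạo chuỗi √discriminant
--     if sqrt_radical == 1:
--         sqrt_str = str(sqrt_coeff)  # Số nguyên
--     elif sqrt_coeff == 1:
--         sqrt_str = f"\\sqrt{{{sqrt_radical}}}"
--     else:
--         sqrt_str = f"{sqrt_coeff}\\sqrt{{{sqrt_radical}}}"
--
--     # Bước 3: Tính nghiệm (-b ± √discriminant)/(2a)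
--     sign = "+" if is_positive_sqrt else "-"
--
--     # Bước 4: Cố gắng đơn giản hóa
--     if 2 * a_coeff == 2:  # mẫu số = 2
--         # Kiểm tra xem có thể rút gọn không
--         if b_coeff % 2 == 0 and sqrt_coeff % 2 == 0:
--             const_part = -b_coeff // 2
--             new_sqrt_coeff = sqrt_coeff // 2
--
--             # Tạo chuỗi kết quả
--             parts = []
--
--             # Phần hằng số
--             if const_part != 0:
--                 parts.append(str(const_part))
--
--             # Phần căn thức
--             if sqrt_radical == 1:
--                 # Không có căn thức (số nguyên)
--                 sqrt_part = str(new_sqrt_coeff)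
--             elif new_sqrt_coeff == 1:
--                 sqrt_part = f"\\sqrt{{{sqrt_radical}}}"
--             else:
--                 sqrt_part = f"{new_sqrt_coeff}\\sqrt{{{sqrt_radical}}}"
--
--             # Kết hợp
--             if len(parts) == 0:  # const_part = 0
--                 return f"{'-' if not is_positive_sqrt else ''}{sqrt_part}"
--             else:
--                 return f"{parts[0]} {sign} {sqrt_part}"
--
--     # Trường hợp không đơn giản được
--     return f"\\frac{{{-b_coeff} {sign} {sqrt_str}}}{{{2*a_coeff}}}"
-- ===== SOURCE B (Python) =====
-- def simple_quadratic_root_format(discriminant, b_coeff, a_coeff, is_positive_sqrt=True):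
--     """Format (-b +/- sqrt(D))/(2a) in LaTeX, with sqrt(D) simplified to k*sqrt(n)."""
--
--     def simplify_sqrt(num):
--         # k = largest d with d*d dividing num (found by one upward scan), n = num // k^2
--         if num == 0:
--             return 0, 1
--         k = 1
--         d = 2
--         while d * d <= num:
--             if num % (d * d) == 0:
--                 k = d
--             d += 1
--         return k, num // (k * k)
--
--     def rad(c, n):
--         # render c*sqrt(n)
--         if n == 1:
--             return str(c)
--         if c == 1:
--             return "\\sqrt{%d}" % n
--         return "%d\\sqrt{%d}" % (c, n)
--
--     k, n = simplify_sqrt(discriminant)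
--     sign = "+" if is_positive_sqrt else "-"
--     if a_coeff == 1 and b_coeff % 2 == 0 and k % 2 == 0:
--         const_part = -b_coeff // 2
--         half = rad(k // 2, n)
--         if const_part == 0:
--             return ("" if is_positive_sqrt else "-") + half
--         return "%d %s %s" % (const_part, sign, half)
--     return "\\frac{%d %s %s}{%d}" % (-b_coeff, sign, rad(k, n), 2 * a_coeff)
-- ===== Notes on version B (the rewrite author's own statement) =====
-- stated objective: simpler
-- what changed: simplify_sqrt is replaced: instead of stripping square prime factors i*i out of n with a nested while loop, B finds the largest d with d*d dividing the discriminant by a single upward scan and divides once (this also makes the 0/negative cases fall out naturally), and the duplicated three-branch LaTeX rendering of c*sqrt(n) is unified into one helper.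
import Mathlib
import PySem

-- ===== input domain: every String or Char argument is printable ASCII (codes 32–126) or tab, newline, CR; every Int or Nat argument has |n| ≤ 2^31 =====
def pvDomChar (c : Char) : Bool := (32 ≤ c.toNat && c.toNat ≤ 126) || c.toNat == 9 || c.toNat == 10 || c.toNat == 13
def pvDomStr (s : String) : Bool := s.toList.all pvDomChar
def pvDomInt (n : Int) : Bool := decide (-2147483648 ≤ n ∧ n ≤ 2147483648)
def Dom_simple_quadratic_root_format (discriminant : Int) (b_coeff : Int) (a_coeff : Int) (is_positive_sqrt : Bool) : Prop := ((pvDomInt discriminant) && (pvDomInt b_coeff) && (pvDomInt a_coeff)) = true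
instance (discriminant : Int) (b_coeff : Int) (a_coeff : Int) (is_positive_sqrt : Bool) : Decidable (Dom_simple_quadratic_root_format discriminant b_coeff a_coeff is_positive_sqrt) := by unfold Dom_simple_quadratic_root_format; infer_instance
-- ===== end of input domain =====

-- B replaces A's nested square-prime-stripping loop by a single upward scan for the largest square
-- divisor and unifies the duplicated c√n rendering into one helper (objective: simpler; not faster).

-- ===== PORT A =====

-- used by the ports' termination proofs
theorem pv_two_mul_le_sq {i : Int} (h : 2 ≤ i) : 2 * i ≤ i * i :=
  mul_le_mul_of_nonneg_right h (by omega)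


-- inner while: `while n % (i*i) == 0: k *= i; n //= i*i`
-- (the fuel argument only makes the recursion total; callers pass enough fuel that it is
-- never exhausted on a reachable state — see pvStripA_spec)
def pvStripA (fuel : Nat) (i k n : Int) : Int × Int :=
  match fuel with
  | 0 => (k, n)
  | f + 1 =>
    if PySem.Int.mod n (i * i) = 0 then
      pvStripA f i (k * i) (PySem.Int.floordiv n (i * i))
    else (k, n)

-- outer while: `while i*i <= n: <inner>; i += 1`  (fuel again only for totality)
def pvOuterA (fuel : Nat) (i k n : Int) : Int × Int :=
  match fuel with
  | 0 => (k, n)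
  | f + 1 =>
    if i * i ≤ n then
      pvOuterA f (i + 1) (pvStripA n.toNat i k n).1 (pvStripA n.toNat i k n).2
    else (k, n)

-- simplify_sqrt of A: num == 0 → (0,1); else k=1, n=num, i=2, loop
def pvSimplifyA (num : Int) : Int × Int :=
  if num = 0 then (0, 1) else pvOuterA (num.toNat + 1) 2 1 num

def simple_quadratic_root_format (discriminant : Int) (b_coeff : Int) (a_coeff : Int) (is_positive_sqrt : Bool) : String :=
  let sc := (pvSimplifyA discriminant).1
  let sr := (pvSimplifyA discriminant).2
  let sqrt_str :=
    if sr = 1 then PySem.Int.toStr sc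
    else if sc = 1 then "\\sqrt{" ++ PySem.Int.toStr sr ++ "}"
    else PySem.Int.toStr sc ++ "\\sqrt{" ++ PySem.Int.toStr sr ++ "}"
  let sign := if is_positive_sqrt then "+" else "-"
  if 2 * a_coeff = 2 ∧ PySem.Int.mod b_coeff 2 = 0 ∧ PySem.Int.mod sc 2 = 0 then
    let const_part := PySem.Int.floordiv (-b_coeff) 2
    let new_sc := PySem.Int.floordiv sc 2
    let parts : List String := if const_part ≠ 0 then [PySem.Int.toStr const_part] else []
    let sqrt_part :=
      if sr = 1 then PySem.Int.toStr new_sc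
      else if new_sc = 1 then "\\sqrt{" ++ PySem.Int.toStr sr ++ "}"
      else PySem.Int.toStr new_sc ++ "\\sqrt{" ++ PySem.Int.toStr sr ++ "}"
    if parts.length = 0 then
      (if !is_positive_sqrt then "-" else "") ++ sqrt_part
    else
      -- parts[0]; parts is nonempty in this branch, so the default is never used (exact)
      PySem.List.pyGetD parts 0 "" ++ " " ++ sign ++ " " ++ sqrt_part
  else
    "\\frac{" ++ PySem.Int.toStr (-b_coeff) ++ " " ++ sign ++ " " ++ sqrt_str ++ "}{" ++ PySem.Int.toStr (2 * a_coeff) ++ "}"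

-- ===== PORT B =====

-- `while d*d <= num: if num % (d*d) == 0: k = d; d += 1`  (`2 ≤ d` only for totality)
def pvScanB (num d k : Int) : Int :=
  if h : 2 ≤ d ∧ d * d ≤ num then
    pvScanB num (d + 1) (if PySem.Int.mod num (d * d) = 0 then d else k)
  else k
termination_by (num - d).toNat
decreasing_by
  obtain ⟨hd, hn⟩ := h
  have h2 : 2 * d ≤ d * d := pv_two_mul_le_sq hd
  omega

def pvSimplifyB (num : Int) : Int × Int :=
  if num = 0 then (0, 1)
  else
    let k := pvScanB num 2 1
    (k, PySem.Int.floordiv num (k * k))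

-- render c√n
def pvRad (c n : Int) : String :=
  if n = 1 then PySem.Int.toStr c
  else if c = 1 then "\\sqrt{" ++ PySem.Int.toStr n ++ "}"
  else PySem.Int.toStr c ++ "\\sqrt{" ++ PySem.Int.toStr n ++ "}"

def simple_quadratic_root_format_alt (discriminant : Int) (b_coeff : Int) (a_coeff : Int) (is_positive_sqrt : Bool) : String :=
  let k := (pvSimplifyB discriminant).1
  let n := (pvSimplifyB discriminant).2
  let sign := if is_positive_sqrt then "+" else "-"
  if a_coeff = 1 ∧ PySem.Int.mod b_coeff 2 = 0 ∧ PySem.Int.mod k 2 = 0 then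
    let const_part := PySem.Int.floordiv (-b_coeff) 2
    let half := pvRad (PySem.Int.floordiv k 2) n
    if const_part = 0 then (if is_positive_sqrt then "" else "-") ++ half
    else PySem.Int.toStr const_part ++ " " ++ sign ++ " " ++ half
  else
    "\\frac{" ++ PySem.Int.toStr (-b_coeff) ++ " " ++ sign ++ " " ++ pvRad k n ++ "}{" ++ PySem.Int.toStr (2 * a_coeff) ++ "}"

-- ===== PRECONDITION & SPEC =====
def Spec_simple_quadratic_root_format (discriminant : Int) (b_coeff : Int) (a_coeff : Int) (is_positive_sqrt : Bool) (out : String) : Prop := out = simple_quadratic_root_format_alt discriminant b_coeff a_coeff is_positive_sqrt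
instance (discriminant : Int) (b_coeff : Int) (a_coeff : Int) (is_positive_sqrt : Bool) (out : String) : Decidable (Spec_simple_quadratic_root_format discriminant b_coeff a_coeff is_positive_sqrt out) := by unfold Spec_simple_quadratic_root_format; infer_instance

-- ===== CLAIM (what is proved, stated in full; the proofs are below) =====
def Claim_equal_simple_quadratic_root_format : Prop := ∀ (discriminant : Int) (b_coeff : Int) (a_coeff : Int) (is_positive_sqrt : Bool), Dom_simple_quadratic_root_format discriminant b_coeff a_coeff is_positive_sqrt → Spec_simple_quadratic_root_format discriminant b_coeff a_coeff is_positive_sqrt (simple_quadratic_root_format discriminant b_coeff a_coeff is_positive_sqrt)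

-- ===== LEMMAS AND PROOFS =====

-- inner-loop invariant: with enough fuel, positivity, divisibility, k²·n preserved,
-- and i² no longer divides the result
theorem pvStripA_spec (i : Int) (hi : 2 ≤ i) : ∀ (fuel : Nat) (k n : Int), 0 < n → 0 < k →
    n.toNat ≤ fuel →
    0 < (pvStripA fuel i k n).1 ∧ 0 < (pvStripA fuel i k n).2 ∧ (pvStripA fuel i k n).2 ∣ n ∧
    (pvStripA fuel i k n).1 * (pvStripA fuel i k n).1 * (pvStripA fuel i k n).2 = k * k * n ∧
    ¬ (i * i ∣ (pvStripA fuel i k n).2) := by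
  intro fuel
  induction fuel with
  | zero => intro k n hn hk hf; omega
  | succ f ih =>
    intro k n hn hk hf
    have h4 : (4 : Int) ≤ i * i := le_trans (by omega) (pv_two_mul_le_sq hi)
    by_cases hm : PySem.Int.mod n (i * i) = 0
    · have hdvd : i * i ∣ n := (PySem.Int.mod_eq_zero_iff_dvd n (i * i)).mp hm
      obtain ⟨t, ht⟩ := hdvd
      have hfd : PySem.Int.floordiv n (i * i) = t := by
        rw [PySem.Int.floordiv_eq_ediv_of_pos (by omega), ht,
          Int.mul_ediv_cancel_left t (by omega)]
      have ht0 : 0 < t := by nlinarith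
      have hki : 0 < k * i := by positivity
      have htle : t.toNat ≤ f := by
        have : 4 * t ≤ n := by nlinarith
        omega
      simp only [pvStripA, if_pos hm]
      obtain ⟨c1, c2, c3, c4, c5⟩ := ih (k * i) (PySem.Int.floordiv n (i * i))
        (hfd ▸ ht0) hki (hfd ▸ htle)
      refine ⟨c1, c2, ?_, ?_, c5⟩
      · exact dvd_trans c3 (by rw [hfd]; exact ⟨i * i, by rw [ht]; ring⟩)
      · rw [c4, hfd, ht]; ring
    · simp only [pvStripA, if_neg hm]
      refine ⟨hk, hn, dvd_refl n, by trivial, ?_⟩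
      intro hdvd
      exact hm ((PySem.Int.mod_eq_zero_iff_dvd n (i * i)).mpr hdvd)

-- outer-loop invariant (fuel bounded below by the remaining scan length)
theorem pvOuterA_spec : ∀ (fuel : Nat) (i k n : Int), 2 ≤ i → 0 < n → 0 < k →
    (n - i).toNat < fuel →
    (∀ j : Int, 2 ≤ j → j < i → ¬ (j * j ∣ n)) →
    0 < (pvOuterA fuel i k n).1 ∧ 0 < (pvOuterA fuel i k n).2 ∧
    (pvOuterA fuel i k n).1 * (pvOuterA fuel i k n).1 * (pvOuterA fuel i k n).2 = k * k * n ∧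
    (∀ j : Int, 2 ≤ j → ¬ (j * j ∣ (pvOuterA fuel i k n).2)) := by
  intro fuel
  induction fuel with
  | zero => intro i k n hi hn hk hf hprev; omega
  | succ f ih =>
    intro i k n hi hn hk hf hprev
    by_cases hin : i * i ≤ n
    · have h2i : 2 * i ≤ i * i := pv_two_mul_le_sq hi
      obtain ⟨s1, s2, s3, s4, s5⟩ := pvStripA_spec i hi n.toNat k n hn hk (le_refl _)
      have hsle : (pvStripA n.toNat i k n).2 ≤ n := Int.le_of_dvd hn s3
      have hprev' : ∀ j : Int, 2 ≤ j → j < i + 1 → ¬ (j * j ∣ (pvStripA n.toNat i k n).2) := by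
        intro j hj hji hjd
        rcases lt_or_eq_of_le (by omega : j ≤ i) with hlt | hEq
        · exact hprev j hj hlt (dvd_trans hjd s3)
        · exact s5 (hEq ▸ hjd)
      simp only [pvOuterA, if_pos hin]
      obtain ⟨c1, c2, c3, c4⟩ := ih (i + 1) (pvStripA n.toNat i k n).1 (pvStripA n.toNat i k n).2
        (by omega) s2 s1 (by omega) hprev'
      exact ⟨c1, c2, by rw [c3, s4], c4⟩
    · have hlt : n < i * i := by omega
      simp only [pvOuterA, if_neg hin]
      refine ⟨hk, hn, by trivial, ?_⟩
      intro j hj hjd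
      have hjp : 0 < j * j := by positivity
      have hle : j * j ≤ n := Int.le_of_dvd hn hjd
      have hji : j < i := by nlinarith
      exact hprev j hj hji hjd

-- A's simplify_sqrt on a positive input: k²·n = num and n has no square divisor > 1
theorem pvSimplifyA_spec (num : Int) (hnum : 0 < num) :
    0 < (pvSimplifyA num).1 ∧ 0 < (pvSimplifyA num).2 ∧
    (pvSimplifyA num).1 * (pvSimplifyA num).1 * (pvSimplifyA num).2 = num ∧
    (∀ j : Int, 2 ≤ j → ¬ (j * j ∣ (pvSimplifyA num).2)) := by
  have hne : num ≠ 0 := hnum.ne'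
  simp only [pvSimplifyA, if_neg hne]
  have h := pvOuterA_spec (num.toNat + 1) 2 1 num (by omega) hnum (by omega) (by omega)
    (fun j hj hji => by omega)
  simpa using h

-- B's scan: result is the largest d ≥ 2 with d² ∣ num, else 1
theorem pvScanB_spec (num : Int) (hnum : 0 < num) : ∀ d k : Int, 2 ≤ d → 1 ≤ k → k < d →
    k * k ∣ num → (∀ j : Int, 2 ≤ j → j < d → j * j ∣ num → j ≤ k) →
    1 ≤ pvScanB num d k ∧ pvScanB num d k * pvScanB num d k ∣ num ∧
    (∀ j : Int, 2 ≤ j → j * j ∣ num → j ≤ pvScanB num d k) := by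
  intro d k
  fun_induction pvScanB num d k with
  | case1 d k h ih =>
    intro hd hk hkd hdvd hmax
    by_cases hm : PySem.Int.mod num (d * d) = 0
    · have hdd : d * d ∣ num := (PySem.Int.mod_eq_zero_iff_dvd num (d * d)).mp hm
      simp only [dif_pos hm, if_pos hm] at ih ⊢
      exact ih (by omega) (by omega) (by omega) hdd
        (fun j hj hjd _ => by omega)
    · simp only [dif_neg hm, if_neg hm] at ih ⊢
      refine ih (by omega) hk (by omega) hdvd ?_
      intro j hj hjd hjdvd
      rcases lt_or_eq_of_le (by omega : j ≤ d) with hlt | hEq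
      · exact hmax j hj hlt hjdvd
      · exact absurd ((PySem.Int.mod_eq_zero_iff_dvd num (d * d)).mpr (hEq ▸ hjdvd)) hm
  | case2 d k h =>
    intro hd hk hkd hdvd hmax
    have hlt : num < d * d := by
      by_contra hc
      exact h ⟨hd, by omega⟩
    refine ⟨hk, hdvd, ?_⟩
    intro j hj hjdvd
    have hle : j * j ≤ num := Int.le_of_dvd hnum hjdvd
    have hji : j < d := by nlinarith
    exact hmax j hj hji hjdvd

-- if n is squarefree (no square divisor > 1) then any d with d² ∣ k²·n divides k (Nat version)
theorem pv_sq_dvd_of_squarefree (k n d : ℕ) (hk : 0 < k) (hn : 0 < n)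
    (hsf : ∀ j : ℕ, 2 ≤ j → ¬ (j * j ∣ n)) (hd : d * d ∣ k * k * n) : d ∣ k := by
  rcases Nat.eq_zero_or_pos d with hd0 | hd0
  · subst hd0
    rw [Nat.zero_mul, Nat.zero_dvd] at hd
    nlinarith [hd]
  have hg : 0 < Nat.gcd d k := Nat.gcd_pos_of_pos_left k hd0
  set g := Nat.gcd d k with hgdef
  obtain ⟨d', hd'⟩ : g ∣ d := Nat.gcd_dvd_left d k
  obtain ⟨k', hk'⟩ : g ∣ k := Nat.gcd_dvd_right d k
  have hcop : Nat.Coprime d' k' := by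
    have := Nat.coprime_div_gcd_div_gcd (m := d) (n := k) hg
    rwa [← hgdef, hd', hk', Nat.mul_div_cancel_left d' hg, Nat.mul_div_cancel_left k' hg] at this
  have hdd' : d' * d' ∣ k' * k' * n := by
    have h2 : (g * g) * (d' * d') ∣ (g * g) * (k' * k' * n) := by
      calc (g * g) * (d' * d') = d * d := by rw [hd']; ring
        _ ∣ k * k * n := hd
        _ = (g * g) * (k' * k' * n) := by rw [hk']; ring
    exact (mul_dvd_mul_iff_left (by positivity : g * g ≠ 0)).mp h2
  have hcop2 : Nat.Coprime (d' * d') (k' * k') :=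
    Nat.Coprime.mul_left (hcop.mul_right hcop) (hcop.mul_right hcop)
  have hdn : d' * d' ∣ n := hcop2.dvd_of_dvd_mul_left hdd'
  have hd1 : d' = 1 := by
    by_contra hne
    rcases Nat.lt_or_ge d' 2 with h2 | h2
    · interval_cases d'
      · simp at hd'; omega
      · exact hne rfl
    · exact hsf d' h2 hdn
  rw [hd', hd1, Nat.mul_one]
  exact Nat.gcd_dvd_right d k

-- the core: the two simplify_sqrt implementations agree everywhere
theorem pvSimplify_eq (num : Int) : pvSimplifyA num = pvSimplifyB num := by
  rcases lt_trichotomy num 0 with hneg | hzero | hpos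
  · -- negative: both loops fall through immediately and (1, num) comes out
    have hne : num ≠ 0 := by omega
    rw [pvSimplifyA, pvSimplifyB, if_neg hne, if_neg hne, pvScanB]
    have hfu : num.toNat + 1 = 1 := by omega
    rw [hfu, pvOuterA, if_neg (by omega), dif_neg (by omega)]
    have : PySem.Int.floordiv num (1 * 1) = num := by
      rw [PySem.Int.floordiv_eq_ediv_of_pos (by omega)]
      simp
    exact Prod.ext rfl this.symm
  · subst hzero; rfl
  · -- positive: A yields the unique (k, n) with k²·n = num and n squarefree,
    -- B yields the largest square divisor; the squarefree quotient forces them equal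
    obtain ⟨hkA, hnA, heq, hsf⟩ := pvSimplifyA_spec num hpos
    obtain ⟨hkB1, hkBdvd, hkBmax⟩ := pvScanB_spec num hpos 2 1 (by omega) (by omega)
      (by omega) (by simp) (fun j hj hji _ => by omega)
    set kA := (pvSimplifyA num).1 with hkAdef
    set nA := (pvSimplifyA num).2 with hnAdef
    set kB := pvScanB num 2 1 with hkBdef
    -- kA ≤ kB
    have hAle : kA ≤ kB := by
      rcases lt_or_ge kA 2 with h2 | h2
      · omega
      · exact hkBmax kA h2 ⟨nA, heq.symm⟩
    -- kB ∣ kA via the Nat squarefree argument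
    have hBdvdA : kB ∣ kA := by
      have hKcast : (kA.toNat : ℤ) = kA := Int.toNat_of_nonneg hkA.le
      have hNcast : (nA.toNat : ℤ) = nA := Int.toNat_of_nonneg hnA.le
      have hBcast : (kB.toNat : ℤ) = kB := Int.toNat_of_nonneg (by omega)
      have hnat : kB.toNat ∣ kA.toNat := by
        apply pv_sq_dvd_of_squarefree kA.toNat nA.toNat kB.toNat
          (by omega) (by omega)
        · intro j hj hjd
          refine hsf (j : ℤ) (by exact_mod_cast hj) ?_
          rw [← hNcast]
          exact_mod_cast hjd
        · have : ((kB.toNat * kB.toNat : ℕ) : ℤ) ∣ ((kA.toNat * kA.toNat * nA.toNat : ℕ) : ℤ) := by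
            push_cast [hKcast, hNcast, hBcast]
            rw [heq]
            exact hkBdvd
          exact_mod_cast this
      rw [← hKcast, ← hBcast]
      exact_mod_cast hnat
    have hkk : kA = kB := le_antisymm hAle (Int.le_of_dvd hkA hBdvdA)
    -- assemble the pairs
    have hne : num ≠ 0 := by omega
    rw [pvSimplifyB, if_neg hne]
    have hfd : PySem.Int.floordiv num (kB * kB) = nA := by
      rw [PySem.Int.floordiv_eq_ediv_of_pos (by nlinarith), ← hkk, ← heq,
        Int.mul_ediv_cancel_left nA (by positivity)]
    rw [pvSimplifyA, if_neg hne] at hkAdef hnAdef ⊢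
    exact Prod.ext (by rw [← hkAdef, hkk]) (by rw [← hnAdef, ← hfd])

-- ===== VERDICT (by name: the statement is the Claim_ definition above) =====
theorem simple_quadratic_root_format_spec : Claim_equal_simple_quadratic_root_format := by
  intro discriminant b_coeff a_coeff is_positive_sqrt _
  unfold Spec_simple_quadratic_root_format
  rw [simple_quadratic_root_format, simple_quadratic_root_format_alt, pvSimplify_eq]
  generalize pvSimplifyB discriminant = p
  obtain ⟨k0, n0⟩ := p
  by_cases h1 : a_coeff = 1
  · have h1' : 2 * a_coeff = 2 := by omega
    by_cases h2 : (2 : Int) ∣ b_coeff <;>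
      by_cases h3 : (2 : Int) ∣ k0 <;>
        by_cases h4 : -b_coeff / 2 = 0 <;>
          cases is_positive_sqrt <;>
            simp [pvRad, h1, h2, h3, h4, PySem.Int.floordiv_eq_ediv_of_pos,
              PySem.List.pyGetD, PySem.List.pyIdx?, PySem.List.pyGet?]
  · have h1' : ¬ (2 * a_coeff = 2) := by omega
    cases is_positive_sqrt <;> simp [pvRad, h1, h1']
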